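-- pv_equiv track=rewrite | github.com/hjcdg1/programmers | algorithm_practice_kit/heap/2.py | solution
-- ===== SOURCE A (Python) =====
-- import heapq
--
-- def solution(jobs):
-- 	N = len(jobs)
-- 	jobs = [[job[1], job[0]] for job in jobs]
-- 	jobs.sort(key=lambda x: x[1])
--
-- 	idx = 0
-- 	start = 0
-- 	total_wait_time = 0
-- 	job_cnt = 0
--
-- 	h = []
--
-- 	while True:
-- 		while idx < N and jobs[idx][1] <= start:
-- 			heapq.heappush(h, jobs[idx])
-- 			idx += 1
--
-- 		if not h:
-- 			start = jobs[idx][1]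
-- 			continue
--
-- 		min_job = heapq.heappop(h)
--
-- 		start += min_job[0]
-- 		total_wait_time += start - min_job[1]
--
-- 		job_cnt += 1
-- 		if job_cnt == N:
-- 			break
--
-- 	answer = total_wait_time // N
-- 	return answer
-- ===== SOURCE B (Python) =====
-- def solution(jobs):
--     n = len(jobs)
--     waiting = [(job[1], job[0]) for job in jobs]
--     pool = []
--     t = 0
--     total = 0
--     for _ in range(n):
--         pool += [j for j in waiting if j[1] <= t]
--         waiting = [j for j in waiting if j[1] > t]
--         if not pool:
--             t = min(j[1] for j in waiting)
--             pool = [j for j in waiting if j[1] <= t]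
--             waiting = [j for j in waiting if j[1] > t]
--         best = min(pool)
--         pool.remove(best)
--         t += best[0]
--         total += t - best[1]
--     return total // n
-- ===== Notes on version B (the rewrite author's own statement) =====
-- stated objective: simpler
-- what changed: A sorts the jobs by arrival time and streams them through a release pointer into a binary heap; B keeps an unsorted waiting list and a pool: each round it moves the jobs whose arrival is due into the pool by filtering, jumps the clock to the earliest waiting arrival when the pool is empty, and removes the pool's lexicographically least (duration, arrival) pair found by a linear scan.
-- outside the precondition, e.g. on solution([]): A raises IndexError, B raises ZeroDivisionError; on solution([[7]]): A raises IndexError, B raises IndexError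
import Mathlib
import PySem

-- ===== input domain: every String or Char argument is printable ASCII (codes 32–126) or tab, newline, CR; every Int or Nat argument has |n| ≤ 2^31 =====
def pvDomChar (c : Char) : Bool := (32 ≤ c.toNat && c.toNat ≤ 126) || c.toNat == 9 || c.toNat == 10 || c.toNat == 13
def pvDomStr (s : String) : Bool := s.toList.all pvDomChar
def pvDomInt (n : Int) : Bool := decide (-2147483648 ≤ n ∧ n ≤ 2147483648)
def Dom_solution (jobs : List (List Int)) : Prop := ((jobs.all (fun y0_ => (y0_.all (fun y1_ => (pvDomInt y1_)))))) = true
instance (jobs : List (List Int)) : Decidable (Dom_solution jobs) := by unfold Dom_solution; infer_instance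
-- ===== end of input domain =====

-- B replaces A's arrival-sort + release pointer + binary heap by a direct two-pool simulation:
-- each round it moves the jobs that have arrived from an unsorted waiting list into a pool and
-- removes the pool's lexicographically least (duration, arrival) pair; objective: simpler.

-- ===== PORT A =====
-- A pushes 2-element lists [duration, arrival] into a heapq heap; they are modeled as pairs
-- (Int × Int), compared lexicographically exactly as Python compares these lists.
-- The heap is modeled by its value contract: a plain list where heappush appends and heappop
-- yields the lexicographically least element (PySem.List.min2?, Python's tuple min) and removes
-- one occurrence of it — exact on values, which is all A observes.
def stepA (sj : List (Int × Int)) (start twt : Int) (pending : Nat) (h : List (Int × Int)) : Int :=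
  -- inner while: push every not-yet-released job (prefix of the arrival-sorted suffix sj) with arrival ≤ start
  let hp := h ++ sj.takeWhile (fun j => decide (j.2 ≤ start))
  let rest := sj.dropWhile (fun j => decide (j.2 ≤ start))
  match PySem.List.min2? hp Prod.fst Prod.snd with
  | none =>
    -- 'if not h: start = jobs[idx][1]; continue' — fused with the next iteration's first push
    -- (arrival of rest's head = new start, so Python pushes it first thing after the continue)
    match _hr : rest with
    | [] => 0  -- unreachable under Pre_: Python raises IndexError here (only when jobs == [])
    | r :: rs => stepA rs r.2 twt pending [r]
  | some m =>
    -- min_job = heapq.heappop(h)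
    let start' := start + m.1
    let twt' := twt + (start' - m.2)
    -- 'job_cnt += 1; if job_cnt == N: break' carried as pending = N - job_cnt
    if pending ≤ 1 then twt' else stepA rest start' twt' (pending - 1) (hp.erase m)
termination_by (pending, sj.length)
decreasing_by
  · apply Prod.Lex.right
    have h1 : rest.length ≤ sj.length :=
      List.length_dropWhile_le (fun j : Int × Int => decide (j.2 ≤ start)) sj
    have h2 : rest.length = rs.length + 1 := by rw [_hr]; simp
    omega
  · apply Prod.Lex.left
    omega

def solution (jobs : List (List Int)) : Int :=
  let N := jobs.length
  -- jobs = [[job[1], job[0]] for job in jobs]  (pyGetD: exact under Pre_, which demands len(job) ≥ 2)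
  let js := jobs.map (fun job => ((PySem.List.pyGetD job 1 0 : Int), (PySem.List.pyGetD job 0 0 : Int)))
  -- jobs.sort(key=lambda x: x[1])
  let sj := PySem.List.sorted js (fun x => x.2) false
  PySem.Int.floordiv (stepA sj 0 0 N []) (N : Int)

-- ===== PORT B =====
-- min(j[1] for j in waiting): Python's min over the arrival values
def minArrival (rem : List (Int × Int)) : Int :=
  (PySem.List.min? (rem.map Prod.snd) (fun x => x)).getD 0  -- getD unreachable: Python min(()) raises (Pre_ excludes)

def stepB : Nat → List (Int × Int) → List (Int × Int) → Int → Int → Int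
  | 0, _, _, _, total => total
  | k + 1, waiting, pool, t, total =>
    -- pool += [j for j in waiting if j[1] <= t]; waiting = [j for j in waiting if j[1] > t]
    let pool1 := pool ++ waiting.filter (fun j => decide (j.2 ≤ t))
    let waiting1 := waiting.filter (fun j => decide (t < j.2))
    -- if not pool: t = min(j[1] for j in waiting); then move the jobs that arrive at that instant
    let t1 := if pool1.isEmpty then minArrival waiting1 else t
    let pool2 := if pool1.isEmpty then waiting1.filter (fun j => decide (j.2 ≤ t1)) else pool1
    let waiting2 := if pool1.isEmpty then waiting1.filter (fun j => decide (t1 < j.2)) else waiting1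
    -- best = min(pool); pool.remove(best)
    match PySem.List.min2? pool2 Prod.fst Prod.snd with
    | none => 0  -- unreachable under Pre_: Python min([]) raises (only when jobs == [])
    | some best => stepB k waiting2 (pool2.erase best) (t1 + best.1) (total + (t1 + best.1 - best.2))

def solution_alt (jobs : List (List Int)) : Int :=
  let n := jobs.length
  let waiting := jobs.map (fun job => ((PySem.List.pyGetD job 1 0 : Int), (PySem.List.pyGetD job 0 0 : Int)))
  PySem.Int.floordiv (stepB n waiting [] 0 0) (n : Int)

-- ===== PRECONDITION & SPEC =====
-- Pre_ excludes exactly the inputs on which A raises: jobs == [] (IndexError at jobs[idx][1],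
-- and B raises ZeroDivisionError there) and jobs containing a job of length < 2 (IndexError
-- at job[1]; B raises equally).
def Pre_solution (jobs : List (List Int)) : Prop :=
  jobs ≠ [] ∧ ∀ job ∈ jobs, 2 ≤ job.length
instance (jobs : List (List Int)) : Decidable (Pre_solution jobs) := by unfold Pre_solution; infer_instance

def pvWitness_solution : List (List Int) := [[0, 3], [1, 9], [2, 6]]

def Spec_solution (jobs : List (List Int)) (out : Int) : Prop := out = solution_alt jobs
instance (jobs : List (List Int)) (out : Int) : Decidable (Spec_solution jobs out) := by unfold Spec_solution; infer_instance

-- ===== CLAIM (what is proved, stated in full; the proofs are below) =====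
def Claim_equal_solution : Prop := ∀ (jobs : List (List Int)), Dom_solution jobs → Pre_solution jobs → Spec_solution jobs (solution jobs)

-- ===== LEMMAS AND PROOFS =====

def pLe (a b : Int × Int) : Prop := a.1 < b.1 ∨ (a.1 = b.1 ∧ a.2 ≤ b.2)

theorem pLe_refl (a : Int × Int) : pLe a a := Or.inr ⟨rfl, le_refl _⟩

theorem pLe_trans {a b c : Int × Int} (h1 : pLe a b) (h2 : pLe b c) : pLe a c := by
  obtain ⟨a1,a2⟩ := a; obtain ⟨b1,b2⟩ := b; obtain ⟨c1,c2⟩ := c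
  simp only [pLe] at *; omega

theorem foldl_min_spec (f : Option (Int × Int) → (Int × Int) → Option (Int × Int))
    (hf : ∀ m x, (f (some m) x = some x ∧ pLe x m) ∨ (f (some m) x = some m ∧ pLe m x)) :
    ∀ (xs : List (Int × Int)) (m r : Int × Int), xs.foldl f (some m) = some r →
      (r = m ∨ r ∈ xs) ∧ pLe r m ∧ ∀ y ∈ xs, pLe r y := by
  intro xs
  induction xs with
  | nil => intro m r hr; simp at hr; subst hr; exact ⟨Or.inl rfl, pLe_refl _, by simp⟩
  | cons x xs ih =>
    intro m r hr
    rw [List.foldl_cons] at hr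
    rcases hf m x with ⟨heq, hle⟩ | ⟨heq, hle⟩ <;> rw [heq] at hr <;>
      obtain ⟨hmem, hle', hall⟩ := ih _ r hr
    · refine ⟨?_, pLe_trans hle' hle, ?_⟩
      · rcases hmem with h' | h' <;> exact Or.inr (by simp [h'])
      · intro y hy
        rcases List.mem_cons.mp hy with h' | h'
        · exact h' ▸ hle'
        · exact hall y h'
    · refine ⟨?_, hle', ?_⟩
      · rcases hmem with h' | h' <;> [exact Or.inl h'; exact Or.inr (by simp [h'])]
      · intro y hy
        rcases List.mem_cons.mp hy with h' | h'
        · exact h' ▸ pLe_trans hle' hle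
        · exact hall y h'

theorem min2?_spec (l : List (Int × Int)) (m : Int × Int)
    (h : PySem.List.min2? l Prod.fst Prod.snd = some m) :
    m ∈ l ∧ ∀ y ∈ l, pLe m y := by
  cases l with
  | nil => simp [PySem.List.min2?] at h
  | cons x xs =>
    simp only [PySem.List.min2?, List.foldl_cons] at h
    obtain ⟨hmem, hle, hall⟩ := foldl_min_spec _ (by
      intro a b
      by_cases hc : (decide (b.1 < a.1) || !decide (a.1 < b.1) && decide (b.2 < a.2)) = true
      · left
        constructor
        · simp only [hc]; rfl
        · simp only [Bool.or_eq_true, Bool.and_eq_true, Bool.not_eq_true', decide_eq_true_eq, decide_eq_false_iff_not] at hc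
          simp only [pLe]; omega
      · right
        constructor
        · simp only [hc]; rfl
        · simp only [Bool.or_eq_true, Bool.and_eq_true, Bool.not_eq_true', decide_eq_true_eq, decide_eq_false_iff_not, not_or, not_and] at hc
          simp only [pLe]; omega) xs x m h
    refine ⟨?_, ?_⟩
    · rcases hmem with h' | h' <;> simp [h']
    · intro y hy
      rcases List.mem_cons.mp hy with h' | h'
      · exact h' ▸ hle
      · exact hall y h'

theorem pLe_antisymm {a b : Int × Int} (h1 : pLe a b) (h2 : pLe b a) : a = b := by
  obtain ⟨a1,a2⟩ := a; obtain ⟨b1,b2⟩ := b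
  simp only [pLe] at h1 h2
  have : a1 = b1 ∧ a2 = b2 := by omega
  simp [this.1, this.2]

theorem foldl_min_ne_none (f : Option (Int × Int) → (Int × Int) → Option (Int × Int))
    (hf : ∀ m x, f (some m) x = some x ∨ f (some m) x = some m) :
    ∀ (xs : List (Int × Int)) (m : Int × Int), xs.foldl f (some m) ≠ none := by
  intro xs
  induction xs with
  | nil => intro m; simp
  | cons x xs ih =>
    intro m
    rw [List.foldl_cons]
    rcases hf m x with h' | h' <;> rw [h'] <;> exact ih _

theorem min2?_eq_none_iff (l : List (Int × Int)) :
    PySem.List.min2? l Prod.fst Prod.snd = none ↔ l = [] := by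
  cases l with
  | nil => simp [PySem.List.min2?]
  | cons x xs =>
    simp only [PySem.List.min2?, List.foldl_cons]
    constructor
    · intro h
      refine absurd h (foldl_min_ne_none _ ?_ xs x)
      intro a b
      by_cases hc : (decide (b.1 < a.1) || !decide (a.1 < b.1) && decide (b.2 < a.2)) = true
      · left; simp only [hc]; rfl
      · right; simp only [hc]; rfl
    · intro h; cases h

theorem min2?_perm {l l' : List (Int × Int)} (hp : l.Perm l') :
    PySem.List.min2? l Prod.fst Prod.snd = PySem.List.min2? l' Prod.fst Prod.snd := by
  cases hl : PySem.List.min2? l Prod.fst Prod.snd with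
  | none =>
    have h1 : l = [] := (min2?_eq_none_iff l).mp hl
    have h2 : l' = [] := by rw [h1] at hp; exact hp.symm.eq_nil
    rw [h2]
    exact ((min2?_eq_none_iff []).mpr rfl).symm
  | some m =>
    cases hl' : PySem.List.min2? l' Prod.fst Prod.snd with
    | none =>
      have h1 : l' = [] := (min2?_eq_none_iff l').mp hl'
      have h2 : l = [] := by rw [h1] at hp; exact hp.eq_nil
      rw [h2, (min2?_eq_none_iff []).mpr rfl] at hl; cases hl
    | some m' =>
      obtain ⟨hm, hmin⟩ := min2?_spec l m hl
      obtain ⟨hm', hmin'⟩ := min2?_spec l' m' hl'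
      have h1 : pLe m m' := hmin m' (hp.mem_iff.mpr hm') 
      have h2 : pLe m' m := hmin' m (hp.mem_iff.mp hm)
      rw [pLe_antisymm h1 h2]

theorem filter_eq_takeWhile (t : Int) (l : List (Int × Int))
    (hs : l.Pairwise (fun a b => a.2 ≤ b.2)) :
    l.filter (fun j => decide (j.2 ≤ t)) = l.takeWhile (fun j => decide (j.2 ≤ t)) := by
  induction l with
  | nil => rfl
  | cons x xs ih =>
    rcases List.pairwise_cons.mp hs with ⟨hx, hxs⟩
    by_cases hxt : x.2 ≤ t
    · simp only [List.filter_cons, List.takeWhile_cons, decide_eq_true hxt]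
      simp [ih hxs]
    · simp only [List.filter_cons, List.takeWhile_cons]
      have hd : (decide (x.2 ≤ t)) = false := by simp [hxt]
      rw [hd]
      simp only [Bool.false_eq_true, if_false]
      rw [List.filter_eq_nil_iff.mpr]
      intro y hy
      simp only [decide_eq_true_eq]
      have := hx y hy
      omega

theorem minArrival_eq (rem : List (Int × Int)) (r : Int × Int) (hr : r ∈ rem)
    (hmin : ∀ x ∈ rem, r.2 ≤ x.2) : minArrival rem = r.2 := by
  unfold minArrival
  cases hv : PySem.List.min? (rem.map Prod.snd) (fun x => x) with
  | none =>
    rw [PySem.List.min?_eq_none_iff] at hv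
    rw [List.map_eq_nil_iff] at hv
    subst hv; cases hr
  | some v =>
    have hvm := PySem.List.min?_mem hv
    obtain ⟨x, hx, hxv⟩ := List.mem_map.mp hvm
    have h1 : r.2 ≤ v := hxv ▸ hmin x hx
    have h2 : v ≤ r.2 := PySem.List.min?_isMin hv r.2 (List.mem_map_of_mem hr)
    simp [le_antisymm h2 h1]

theorem filter_gt_eq_dropWhile (t : Int) (l : List (Int × Int))
    (hs : l.Pairwise (fun a b => a.2 ≤ b.2)) :
    l.filter (fun j => decide (t < j.2)) = l.dropWhile (fun j => decide (j.2 ≤ t)) := by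
  induction l with
  | nil => rfl
  | cons x xs ih =>
    rcases List.pairwise_cons.mp hs with ⟨hx, hxs⟩
    by_cases hxt : x.2 ≤ t
    · simp only [List.filter_cons, List.dropWhile_cons, decide_eq_true hxt]
      have : (decide (t < x.2)) = false := by simp; omega
      rw [this]
      simp [ih hxs]
    · simp only [List.filter_cons, List.dropWhile_cons]
      have h1 : (decide (x.2 ≤ t)) = false := by simp [hxt]
      have h2 : (decide (t < x.2)) = true := by simp; omega
      rw [h1, h2]
      simp only [Bool.false_eq_true, if_false, if_true]
      rw [List.filter_eq_self.mpr]
      intro y hy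
      have := hx y hy
      simp only [decide_eq_true_eq]
      omega

theorem minArrival_perm {w w' : List (Int × Int)} (hw : w.Perm w') :
    minArrival w = minArrival w' := by
  unfold minArrival
  have hm := hw.map Prod.snd
  cases hv : PySem.List.min? (w.map Prod.snd) (fun x => x) with
  | none =>
    rw [PySem.List.min?_eq_none_iff] at hv
    rw [hv] at hm
    rw [(PySem.List.min?_eq_none_iff _ _).mpr hm.symm.eq_nil]
  | some v =>
    cases hv' : PySem.List.min? (w'.map Prod.snd) (fun x => x) with
    | none =>
      rw [PySem.List.min?_eq_none_iff] at hv'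
      rw [hv'] at hm
      rw [(PySem.List.min?_eq_none_iff _ _).mpr hm.eq_nil] at hv
      cases hv
    | some v' =>
      have h1 : v' ≤ v := PySem.List.min?_isMin hv' v (hm.mem_iff.mp (PySem.List.min?_mem hv))
      have h2 : v ≤ v' := PySem.List.min?_isMin hv v' (hm.mem_iff.mpr (PySem.List.min?_mem hv'))
      simp [le_antisymm h2 h1]

theorem permIsEmpty {l l' : List (Int × Int)} (h : l.Perm l') : l.isEmpty = l'.isEmpty := by
  cases l with
  | nil => rw [h.symm.eq_nil.symm]
  | cons a t =>
    cases l' with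
    | nil => cases h.eq_nil
    | cons b u => rfl

theorem stepB_perm : ∀ (k : Nat) (w w' p p' : List (Int × Int)) (t total : Int),
    w.Perm w' → p.Perm p' → stepB k w p t total = stepB k w' p' t total := by
  intro k
  induction k with
  | zero => intro w w' p p' t total _ _; rfl
  | succ k ih =>
    intro w w' p p' t total hw hp
    simp only [stepB]
    have hpool1 : (p ++ w.filter (fun j => decide (j.2 ≤ t))).Perm
        (p' ++ w'.filter (fun j => decide (j.2 ≤ t))) := hp.append (hw.filter _)
    have hw1 : (w.filter (fun j => decide (t < j.2))).Perm
        (w'.filter (fun j => decide (t < j.2))) := hw.filter _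
    have hie := permIsEmpty hpool1
    rw [← hie, ← minArrival_perm hw1]
    by_cases hb : (p ++ w.filter (fun j => decide (j.2 ≤ t))).isEmpty
    · simp only [hb, if_true]
      set t1 := minArrival (w.filter (fun j => decide (t < j.2))) with ht1
      have hpool2 : ((w.filter (fun j => decide (t < j.2))).filter (fun j => decide (j.2 ≤ t1))).Perm
          ((w'.filter (fun j => decide (t < j.2))).filter (fun j => decide (j.2 ≤ t1))) := hw1.filter _
      rw [← min2?_perm hpool2]
      cases hmm : PySem.List.min2? ((w.filter (fun j => decide (t < j.2))).filter (fun j => decide (j.2 ≤ t1))) Prod.fst Prod.snd with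
      | none => rfl
      | some best => exact ih _ _ _ _ _ _ (hw1.filter _) (hpool2.erase best)
    · simp only [hb, Bool.false_eq_true, if_false]
      rw [← min2?_perm hpool1]
      cases hmm : PySem.List.min2? (p ++ w.filter (fun j => decide (j.2 ≤ t))) Prod.fst Prod.snd with
      | none => rfl
      | some best => exact ih _ _ _ _ _ _ hw1 (hpool1.erase best)

-- the simulation: A's state (arrival-sorted unreleased suffix sj, heap h) runs B's round
-- with waiting list sj and pool h
theorem sim (sj : List (Int × Int)) (start twt : Int) (pending : Nat) (h : List (Int × Int)) :
    sj.Pairwise (fun a b => a.2 ≤ b.2) →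
    pending = sj.length + h.length →
    pending ≠ 0 →
    stepA sj start twt pending h = stepB pending sj h start twt := by
  fun_induction stepA sj start twt pending h with
  | case1 sj start twt pending h hp rest hm hr =>
    intro hsort hpend hne
    rw [min2?_eq_none_iff] at hm
    obtain ⟨hh, htake⟩ := List.append_eq_nil_iff.mp hm
    have hsj : sj = [] := by
      conv_lhs => rw [← List.takeWhile_append_dropWhile (p := fun j : Int × Int => decide (j.2 ≤ start)) (l := sj)]
      rw [htake]
      exact hr
    rw [hsj, hh] at hpend
    simp at hpend
    exact absurd hpend hne
  | case2 sj start twt pending h hp rest hm r rs hr ih =>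
    intro hsort hpend hne
    rw [min2?_eq_none_iff] at hm
    obtain ⟨hh, htake⟩ := List.append_eq_nil_iff.mp hm
    have hsj : sj = r :: rs := by
      conv_lhs => rw [← List.takeWhile_append_dropWhile (p := fun j : Int × Int => decide (j.2 ≤ start)) (l := sj)]
      rw [htake]
      exact hr
    subst hh hsj
    obtain ⟨hrle, hrs⟩ := List.pairwise_cons.mp hsort
    simp only [List.length_cons, List.length_nil, Nat.add_zero] at hpend
    rw [ih hrs (by simp [hpend]) hne, hpend]
    -- stepB (rs.length+1) rs [r] r.2 twt = stepB (rs.length+1) (r :: rs) [] start twt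
    have hfilt : (r :: rs).filter (fun j => decide (j.2 ≤ start)) = [] := by
      rw [filter_eq_takeWhile start _ hsort]
      exact htake
    have hwait1 : (r :: rs).filter (fun j => decide (start < j.2)) = r :: rs := by
      rw [filter_gt_eq_dropWhile start _ hsort]
      exact hr
    have hminr : minArrival (r :: rs) = r.2 := by
      apply minArrival_eq _ r List.mem_cons_self
      intro x hx
      rcases List.mem_cons.mp hx with h' | h'
      · exact h' ▸ le_refl _
      · exact hrle x h'
    simp only [stepB, hfilt, hwait1, List.append_nil, List.isEmpty_nil,
      if_true, hminr, Bool.false_eq_true, if_false,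
      List.filter_cons, decide_eq_true (le_refl r.2), lt_irrefl r.2, decide_false]
    rfl
  | case3 sj start twt pending h hp m hm start' twt' hpd =>
    intro hsort hpend hne
    obtain ⟨k, rfl⟩ := Nat.exists_eq_succ_of_ne_zero hne
    have hk : k = 0 := by omega
    subst hk
    have hfilt : sj.filter (fun j => decide (j.2 ≤ start)) = sj.takeWhile (fun j => decide (j.2 ≤ start)) :=
      filter_eq_takeWhile start sj hsort
    have hie : (h ++ sj.takeWhile (fun j => decide (j.2 ≤ start))).isEmpty = false := by
      cases hph : (h ++ sj.takeWhile (fun j => decide (j.2 ≤ start))) with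
      | nil => rw [(min2?_eq_none_iff _).mpr hph] at hm; cases hm
      | cons a l => rfl
    have hm' : PySem.List.min2? (h ++ sj.takeWhile (fun j => decide (j.2 ≤ start))) Prod.fst Prod.snd = some m := hm
    simp only [stepB, hfilt, hie, Bool.false_eq_true, if_false, hm']
    rfl
  | case4 sj start twt pending h hp rest m hm start' twt' hpd ih =>
    intro hsort hpend hne
    obtain ⟨k, rfl⟩ := Nat.exists_eq_succ_of_ne_zero hne
    have hfilt : sj.filter (fun j => decide (j.2 ≤ start)) = sj.takeWhile (fun j => decide (j.2 ≤ start)) :=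
      filter_eq_takeWhile start sj hsort
    have hie : (h ++ sj.takeWhile (fun j => decide (j.2 ≤ start))).isEmpty = false := by
      cases hph : (h ++ sj.takeWhile (fun j => decide (j.2 ≤ start))) with
      | nil => rw [(min2?_eq_none_iff _).mpr hph] at hm; cases hm
      | cons a l => rfl
    have hm' : PySem.List.min2? (h ++ sj.takeWhile (fun j => decide (j.2 ≤ start))) Prod.fst Prod.snd = some m := hm
    simp only [stepB, hfilt, hie, Bool.false_eq_true, if_false, hm']
    rw [filter_gt_eq_dropWhile start sj hsort]
    have hmhp : m ∈ hp := (min2?_spec hp m hm).1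
    have hlen1 : (sj.takeWhile (fun j : Int × Int => decide (j.2 ≤ start))).length
        + rest.length = sj.length := by
      have h0 := congrArg List.length
        (List.takeWhile_append_dropWhile (p := fun j : Int × Int => decide (j.2 ≤ start)) (l := sj))
      rw [List.length_append] at h0
      exact h0
    have hlen2 : (hp.erase m).length = hp.length - 1 := List.length_erase_of_mem hmhp
    have hlen3 : hp.length = h.length + (sj.takeWhile (fun j : Int × Int => decide (j.2 ≤ start))).length := by
      simp [hp]
    have hne' : hp ≠ [] := List.ne_nil_of_mem hmhp
    have hppos : 0 < hp.length := List.length_pos_iff.mpr hne'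
    exact ih (hsort.sublist (List.dropWhile_sublist _)) (by omega) (by omega)

-- ===== VERDICT (by name: the statement is the Claim_ definition above) =====
theorem solution_spec : Claim_equal_solution := by
  unfold Claim_equal_solution
  intro jobs _hdom hpre
  obtain ⟨hne, _hjobs⟩ := hpre
  unfold Spec_solution solution solution_alt
  have hlen : jobs.length ≠ 0 := by simpa using hne
  have heq0 : stepA (PySem.List.sorted (jobs.map (fun job => ((PySem.List.pyGetD job 1 0 : Int), (PySem.List.pyGetD job 0 0 : Int)))) (fun x => x.2) false) 0 0 jobs.length []
      = stepB jobs.length (PySem.List.sorted (jobs.map (fun job => ((PySem.List.pyGetD job 1 0 : Int), (PySem.List.pyGetD job 0 0 : Int)))) (fun x => x.2) false) [] 0 0 := by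
    apply sim
    · exact PySem.List.sorted_pairwise _ _
    · rw [PySem.List.length_sorted]
      simp
    · exact hlen
  have heq1 : stepB jobs.length (PySem.List.sorted (jobs.map (fun job => ((PySem.List.pyGetD job 1 0 : Int), (PySem.List.pyGetD job 0 0 : Int)))) (fun x => x.2) false) [] 0 0
      = stepB jobs.length (jobs.map (fun job => ((PySem.List.pyGetD job 1 0 : Int), (PySem.List.pyGetD job 0 0 : Int)))) [] 0 0 :=
    stepB_perm _ _ _ _ _ _ _ (PySem.List.sorted_perm _ _ _) (List.Perm.refl _)
  simp only []
  rw [heq0, heq1]
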